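-- pv_equiv track=rewrite | github.com/MirosMax/ex_t_bank | Contest/rulet.py | func
-- ===== SOURCE A (Python) =====
-- def func(n):
--     if n == 1:
--         return 0
--     elif n == 2:
--         return 1
--
--     if n % 2:
--         return 1 + func(n // 2 + 1)
--     else:
--         return 1 + func(n // 2)
-- ===== SOURCE B (Python) =====
-- def func(n):
--     # closed form: number of ceil-halving steps from n down to 1
--     return (n - 1).bit_length()
-- ===== Notes on version B (the rewrite author's own statement) =====
-- stated objective: simpler
-- what changed: Replaces the recursive ceil-halving count with the closed form (n-1).bit_length(), a single integer expression.
-- outside the precondition, e.g. on func(0): A raises RecursionError, B returns 1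
import Mathlib
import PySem

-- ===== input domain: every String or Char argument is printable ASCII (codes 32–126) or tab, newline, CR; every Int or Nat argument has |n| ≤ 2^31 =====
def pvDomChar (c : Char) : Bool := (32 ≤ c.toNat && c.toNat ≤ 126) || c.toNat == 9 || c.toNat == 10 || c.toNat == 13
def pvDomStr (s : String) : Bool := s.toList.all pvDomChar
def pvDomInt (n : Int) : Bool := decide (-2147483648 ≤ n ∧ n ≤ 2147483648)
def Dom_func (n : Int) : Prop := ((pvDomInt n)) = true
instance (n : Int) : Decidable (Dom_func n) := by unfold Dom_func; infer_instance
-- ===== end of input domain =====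

-- B replaces A's recursion by the closed form (n-1).bit_length() (simpler, no recursion).

-- ===== PORT A =====
-- Fuel-bounded transcription of A's recursion (Python does not terminate for n ≤ 0,
-- which Pre_func excludes; for n ≥ 1 the fuel n.toNat is always sufficient).
def funcGo : Nat → Int → Int
  | 0, _ => 0
  | fuel + 1, n =>
    if n = 1 then 0
    else if n = 2 then 1
    else if PySem.Int.mod n 2 ≠ 0 then 1 + funcGo fuel (PySem.Int.floordiv n 2 + 1)
    else 1 + funcGo fuel (PySem.Int.floordiv n 2)

def func (n : Int) : Int := funcGo n.toNat n

-- ===== PORT B =====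
def func_alt (n : Int) : Int := (PySem.Int.bitLength (n - 1) : Nat)

-- ===== PRECONDITION & SPEC =====
-- Pre_ excludes n ≤ 0, on which A's recursion never reaches a base case and raises RecursionError.
def Pre_func (n : Int) : Prop := 1 ≤ n
instance (n : Int) : Decidable (Pre_func n) := by unfold Pre_func; infer_instance
def pvWitness_func : Int := (5)

def Spec_func (n : Int) (out : Int) : Prop := out = func_alt n
instance (n : Int) (out : Int) : Decidable (Spec_func n out) := by unfold Spec_func; infer_instance

-- ===== CLAIM (what is proved, stated in full; the proofs are below) =====
def Claim_equal_func : Prop := ∀ (n : Int), Dom_func n → Pre_func n → Spec_func n (func n)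

-- ===== LEMMAS AND PROOFS =====

-- bit_length halving step, phrased for the positive integer m.
theorem bitLength_step (m : Int) (hm : 1 ≤ m) :
    (PySem.Int.bitLength m : Int) = (PySem.Int.bitLength (PySem.Int.floordiv m 2) : Int) + 1 := by
  have := PySem.Int.bitLength_of_pos (n := m) (by omega)
  rw [this]; push_cast; ring

theorem floordiv_two (m : Int) : PySem.Int.floordiv m 2 = m / 2 :=
  PySem.Int.floordiv_eq_ediv_of_pos (by omega)

theorem funcGo_eq (fuel : Nat) (n : Int) (h1 : 1 ≤ n) (hf : n ≤ (fuel : Int)) :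
    funcGo fuel n = (PySem.Int.bitLength (n - 1) : Nat) := by
  induction fuel generalizing n with
  | zero => omega
  | succ k ih =>
    by_cases hA : n = 1
    · subst hA; simp [funcGo]
    by_cases hB : n = 2
    · subst hB; rw [funcGo]; norm_num; decide
    have h3 : 3 ≤ n := by omega
    rw [funcGo]
    simp only [hA, hB, if_false]
    rw [floordiv_two]
    have hmod : PySem.Int.mod n 2 = n % 2 := PySem.Int.mod_eq_emod_of_pos (by omega)
    by_cases hpar : n % 2 = 0
    · -- even branch
      have : ¬ (PySem.Int.mod n 2 ≠ 0) := by rw [hmod]; omega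
      rw [if_neg this]
      rw [ih (n / 2) (by omega) (by omega)]
      have hstep := bitLength_step (n - 1) (by omega)
      rw [floordiv_two] at hstep
      have harg : (n - 1) / 2 = n / 2 - 1 := by omega
      rw [harg] at hstep
      omega
    · -- odd branch
      have : (PySem.Int.mod n 2 ≠ 0) := by rw [hmod]; omega
      rw [if_pos this]
      rw [ih (n / 2 + 1) (by omega) (by omega)]
      have hstep := bitLength_step (n - 1) (by omega)
      rw [floordiv_two] at hstep
      have harg : (n - 1) / 2 = n / 2 + 1 - 1 := by omega
      rw [harg] at hstep
      omega

-- ===== VERDICT (by name: the statement is the Claim_ definition above) =====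
theorem func_spec : Claim_equal_func := by
  intro n _ hpre
  unfold Spec_func func func_alt
  exact funcGo_eq n.toNat n hpre (by omega)
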